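-- pv_equiv track=rewrite | github.com/empi91/Advent_of_Code | 2023/09/09_02.py | calc_first_value
-- ===== SOURCE A (Python) =====
-- def calc_first_value(values):
--     score = 0
--     prev_value = 0
--     values.pop(-1)
--     length = len(values)
--
--     for i in range(length):
--         if i == 0:
--             prev_value = values[-1]
--         else:
--             prev_value = values[-i - 1] - prev_value
--     score = prev_value
--     return score
-- ===== SOURCE B (Python) =====
-- def calc_first_value(values):
--     values.pop(-1)
--     total = 0
--     for i, v in enumerate(values):
--         if i % 2 == 0:
--             total += v
--         else:
--             total -= v
--     return total
-- ===== Notes on version B (the rewrite author's own statement) =====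
-- stated objective: simpler
-- what changed: B replaces A's back-to-front subtractive recurrence over negative indices with a single forward pass that adds or subtracts each element by index parity (same alternating sum a[0]-a[1]+a[2]-...).
import Mathlib
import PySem

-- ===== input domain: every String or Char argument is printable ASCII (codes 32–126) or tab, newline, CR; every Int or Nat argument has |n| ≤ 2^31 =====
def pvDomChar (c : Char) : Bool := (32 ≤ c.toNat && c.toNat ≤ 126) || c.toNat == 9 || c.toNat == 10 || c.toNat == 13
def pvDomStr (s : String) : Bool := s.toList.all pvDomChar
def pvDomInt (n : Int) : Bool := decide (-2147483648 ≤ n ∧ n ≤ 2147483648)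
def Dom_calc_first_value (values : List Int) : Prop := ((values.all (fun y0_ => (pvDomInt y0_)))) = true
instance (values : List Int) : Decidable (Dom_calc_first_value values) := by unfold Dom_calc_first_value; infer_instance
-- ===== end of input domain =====

-- B computes the same alternating sum of the popped list by a forward sign-toggle pass instead of
-- A's back-to-front subtractive recurrence over negative indices (objective: simpler).
-- Both A and B mutate the caller's list (values.pop(-1)); the equivalence proved is about the return value.

-- ===== PORT A =====
def calc_first_value (values : List Int) : Int :=
  match PySem.List.pop? values (-1) with
  | none => 0  -- IndexError on empty list; excluded by Pre_
  | some (_, vs) =>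
    let length := vs.length
    let prev : Int :=
      (PySem.List.pyRange 0 length 1).foldl
        (fun prev i =>
          if i = 0 then PySem.List.pyGetD vs (-1) 0
          else PySem.List.pyGetD vs (-i - 1) 0 - prev) 0
    prev

-- ===== PORT B =====
def calc_first_value_alt (values : List Int) : Int :=
  match PySem.List.pop? values (-1) with
  | none => 0  -- IndexError on empty list; excluded by Pre_
  | some (_, vs) =>
    (PySem.List.enumerate vs).foldl
      (fun total p => if PySem.Int.mod p.1 2 = 0 then total + p.2 else total - p.2) 0

-- ===== PRECONDITION & SPEC =====
-- Pre_ excludes exactly the empty list, where values.pop(-1) raises IndexError in A (and in B).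
def Pre_calc_first_value (values : List Int) : Prop := values ≠ []
instance (values : List Int) : Decidable (Pre_calc_first_value values) := by
  unfold Pre_calc_first_value; infer_instance
def pvWitness_calc_first_value : List Int := [3, 1, 4, 1, 5]

def Spec_calc_first_value (values : List Int) (out : Int) : Prop := out = calc_first_value_alt values
instance (values : List Int) (out : Int) : Decidable (Spec_calc_first_value values out) := by
  unfold Spec_calc_first_value; infer_instance

-- ===== CLAIM (what is proved, stated in full; the proofs are below) =====
def Claim_equal_calc_first_value : Prop := ∀ (values : List Int), Dom_calc_first_value values → Pre_calc_first_value values → Spec_calc_first_value values (calc_first_value values)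

-- ===== LEMMAS AND PROOFS =====

/-- The alternating sum a₀ - a₁ + a₂ - … both programs compute. -/
def pvAltSum : List Int → Int
  | [] => 0
  | x :: xs => x - pvAltSum xs

/-- B's forward fold with sign decided by index parity equals ±(total shift) of the alternating sum. -/
lemma altFold_eq (vs : List Int) : ∀ (s total : Int),
    (PySem.List.enumerate vs s).foldl
      (fun total p => if PySem.Int.mod p.1 2 = 0 then total + p.2 else total - p.2) total
    = total + (if PySem.Int.mod s 2 = 0 then pvAltSum vs else -pvAltSum vs) := by
  induction vs with
  | nil => intro s total; simp [PySem.List.enumerate_nil, pvAltSum]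
  | cons v rest ih =>
    intro s total
    rw [PySem.List.enumerate_cons]
    simp only [List.foldl_cons]
    rw [ih (s + 1)]
    rw [PySem.Int.mod_eq_emod_of_pos (by omega : (0:Int) < 2),
        PySem.Int.mod_eq_emod_of_pos (by omega : (0:Int) < 2)]
    simp only [pvAltSum]
    by_cases h : s % 2 = 0
    · have h1 : (s + 1) % 2 = 1 := by omega
      simp [h, h1]; ring
    · have h1 : (s + 1) % 2 = 0 := by omega
      simp [h, h1]; ring

/-- A's back-to-front recurrence over negative indices equals the alternating sum. -/
lemma backFold_eq (vs : List Int) :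
    (PySem.List.pyRange 0 vs.length 1).foldl
      (fun prev i =>
        if i = 0 then PySem.List.pyGetD vs (-1) 0
        else PySem.List.pyGetD vs (-i - 1) 0 - prev) 0
    = pvAltSum vs := by
  induction vs with
  | nil => simp [pvAltSum]
  | cons x rest ih =>
    rw [show ((x :: rest).length : Nat) = rest.length + 1 from rfl]
    rw [show ((rest.length + 1 : Nat) : Int) = (rest.length : Int) + 1 by push_cast; ring]
    rw [PySem.List.pyRange_one_succ_right (by positivity)]
    rw [List.foldl_append]
    -- the sub-fold over range 0 rest.length reads the same elements on x::rest as on rest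
    have hcongr :
        (PySem.List.pyRange 0 rest.length 1).foldl
          (fun prev i =>
            if i = 0 then PySem.List.pyGetD (x :: rest) (-1) 0
            else PySem.List.pyGetD (x :: rest) (-i - 1) 0 - prev) 0
        = (PySem.List.pyRange 0 rest.length 1).foldl
          (fun prev i =>
            if i = 0 then PySem.List.pyGetD rest (-1) 0
            else PySem.List.pyGetD rest (-i - 1) 0 - prev) 0 := by
      apply PySem.List.foldl_congr_mem
      intro acc i hi
      rw [PySem.List.mem_pyRange_one] at hi
      have hi0 : 0 ≤ i := hi.1
      have hin : i < (rest.length : Int) := hi.2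
      have hk : (-i - 1) = -((i.toNat + 1 : Nat) : Int) := by push_cast; omega
      have hk1 : 0 < i.toNat + 1 := by omega
      have hkr : i.toNat + 1 ≤ rest.length := by omega
      have hkc : i.toNat + 1 ≤ (x :: rest).length := by simp [List.length_cons]; omega
      by_cases h0 : i = 0
      · subst h0
        have hne : rest ≠ [] := by intro h; subst h; simp at hin
        norm_num
        rw [PySem.List.pyGetD_neg_one _ _ hne,
            PySem.List.pyGetD_neg_one _ _ (List.cons_ne_nil x rest)]
        exact List.getLast_cons hne
      · simp only [if_neg h0]
        congr 1
        rw [hk, PySem.List.pyGetD_neg_natCast _ _ _ hk1 hkr,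
            PySem.List.pyGetD_neg_natCast _ _ _ hk1 hkc]
        have hidx : (x :: rest).length - (i.toNat + 1) = (rest.length - (i.toNat + 1)) + 1 := by
          simp only [List.length_cons]; omega
        simp only [hidx]
        exact List.getElem_cons_succ x rest _ _
    rw [hcongr, ih]
    -- last iteration i = rest.length reads vs[0] = x
    by_cases hr : rest = []
    · subst hr
      simp [pvAltSum, PySem.List.pyGetD_neg_one]
    · have hlen' : 0 < rest.length := List.length_pos_iff.mpr hr
      simp only [List.foldl_cons, List.foldl_nil]
      rw [if_neg (by omega : ((rest.length : Int)) ≠ 0)]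
      have hk : (-(rest.length : Int) - 1) = -(((rest.length + 1 : Nat)) : Int) := by
        push_cast; ring
      rw [hk, PySem.List.pyGetD_neg_natCast _ _ _ (by omega) (by simp)]
      simp [pvAltSum]

-- ===== VERDICT (by name: the statement is the Claim_ definition above) =====
theorem calc_first_value_spec : Claim_equal_calc_first_value := by
  intro values _ hpre
  unfold Spec_calc_first_value calc_first_value calc_first_value_alt
  obtain ⟨vs, x, rfl⟩ : ∃ vs x, values = vs ++ [x] := by
    rcases List.eq_nil_or_concat values with h | ⟨vs, x, h⟩
    · exact absurd h hpre
    · exact ⟨vs, x, by simpa [List.concat_eq_append] using h⟩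
  rw [PySem.List.pop?_last]
  simp only
  rw [backFold_eq, altFold_eq]
  norm_num [PySem.Int.mod_eq_emod_of_pos (by omega : (0:Int) < 2)]
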